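-- pv_equiv track=rewrite | github.com/ShadowGreg/GB_Python | Lesson003/Homework/task4.py | binary_number
-- ===== SOURCE A (Python) =====
-- def binary_number(in_num: int) -> str:
--     count = 0
--     out_str = ''
--     while in_num > 0:
--         count += 1
--         out_str = str(in_num % 2) + out_str
--         in_num = in_num // 2
--         if count == 4:
--             out_str = ' ' + out_str
--             count = 0
--     return out_str
-- ===== SOURCE B (Python) =====
-- def binary_number(in_num: int) -> str:
--     if in_num <= 0:
--         return ''
--     bits = bin(in_num)[2:]
--     n = len(bits)
--     out = ''
--     for i, ch in enumerate(bits):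
--         if (n - i) % 4 == 0:
--             out += ' '
--         out += ch
--     return out
-- ===== Notes on version B (the rewrite author's own statement) =====
-- stated objective: simpler
-- what changed: Replaces the divide-and-prepend loop with its interleaved space counter by: compute the binary digit string once, then one indexed left-to-right pass that inserts a space before a bit whenever the remaining bit count is divisible by 4.
import Mathlib
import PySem

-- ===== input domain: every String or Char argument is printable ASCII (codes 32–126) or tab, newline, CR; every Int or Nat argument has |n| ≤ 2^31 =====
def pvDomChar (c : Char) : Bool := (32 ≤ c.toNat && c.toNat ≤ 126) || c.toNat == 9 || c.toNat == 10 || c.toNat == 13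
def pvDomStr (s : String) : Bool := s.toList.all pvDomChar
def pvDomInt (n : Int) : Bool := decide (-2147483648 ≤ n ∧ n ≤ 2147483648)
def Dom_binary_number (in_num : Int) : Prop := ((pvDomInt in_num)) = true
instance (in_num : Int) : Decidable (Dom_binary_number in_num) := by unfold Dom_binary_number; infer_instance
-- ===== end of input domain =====

-- B computes the binary digits once and makes a single indexed pass inserting the
-- spaces positionally; A interleaves a counter with a divide-and-prepend loop.  Same result.

-- ===== PORT A =====
-- literal port of A's while-loop: count, out_str, in_num updated exactly as in the Python
def bnLoop (n count : Int) (out : List Char) : List Char :=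
  if h : 0 < n then
    let count1 := count + 1
    let out1 := PySem.Int.toChars (PySem.Int.mod n 2) ++ out
    let n1 := PySem.Int.floordiv n 2
    if count1 == 4 then bnLoop n1 0 (' ' :: out1) else bnLoop n1 count1 out1
  else out
termination_by n.toNat
decreasing_by
  all_goals
    simp only [PySem.Int.floordiv]
    rw [Int.fdiv_eq_ediv]
    simp only [le_refl, Int.reduceLE, true_or, if_true, or_true]
    omega

def binary_number (in_num : Int) : String := String.mk (bnLoop in_num 0 [])

-- ===== PORT B =====
-- port of Source B's `bin(in_num)[2:]`: binary digits, least-significant first, then reversed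
def bnBitsRev (n : Nat) : List Char :=
  if _h : n = 0 then [] else (if n % 2 = 1 then '1' else '0') :: bnBitsRev (n / 2)
decreasing_by exact Nat.div_lt_self (by omega) (by omega)

def binary_number_alt (in_num : Int) : String :=
  if in_num ≤ 0 then "" else
    let bits := (bnBitsRev in_num.toNat).reverse
    let L := PySem.List.len bits
    String.mk ((PySem.List.enumerate bits).foldl
      (fun acc ic => (if PySem.Int.mod (L - ic.1) 4 == 0 then acc ++ [' '] else acc) ++ [ic.2]) [])

-- ===== PRECONDITION & SPEC =====
def Spec_binary_number (in_num : Int) (out : String) : Prop := out = binary_number_alt in_num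
instance (in_num : Int) (out : String) : Decidable (Spec_binary_number in_num out) := by unfold Spec_binary_number; infer_instance

-- ===== CLAIM (what is proved, stated in full; the proofs are below) =====
def Claim_equal_binary_number : Prop := ∀ (in_num : Int), Dom_binary_number in_num → Spec_binary_number in_num (binary_number in_num)

-- ===== LEMMAS AND PROOFS =====

-- A's loop, with the accumulation stripped: space inserted after every 4th bit (count c)
def spacedRev (bs : List Char) (c : Nat) : List Char :=
  match bs with
  | [] => []
  | b :: bs => if c = 3 then b :: ' ' :: spacedRev bs 0 else b :: spacedRev bs (c + 1)

-- B's pass, with the index replaced by the remaining bit count m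
def goD (cs : List Char) (m : Int) : List Char :=
  match cs with
  | [] => []
  | b :: cs => (if m % 4 = 0 then [' ', b] else [b]) ++ goD cs (m - 1)

lemma goD_append (xs ys : List Char) (m : Int) :
    goD (xs ++ ys) m = goD xs m ++ goD ys (m - xs.length) := by
  induction xs generalizing m with
  | nil => simp [goD]
  | cons x xs ih =>
      calc goD ((x :: xs) ++ ys) m
          = (if m % 4 = 0 then [' ', x] else [x]) ++ goD (xs ++ ys) (m - 1) := rfl
        _ = (if m % 4 = 0 then [' ', x] else [x])
              ++ (goD xs (m - 1) ++ goD ys (m - 1 - xs.length)) := by rw [ih]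
        _ = goD (x :: xs) m ++ goD ys (m - ((x :: xs).length : Int)) := by
              show _ = ((if m % 4 = 0 then [' ', x] else [x]) ++ goD xs (m - 1))
                ++ goD ys (m - ((x :: xs).length : Int))
              rw [List.append_assoc]
              congr 3
              simp only [List.length_cons]
              push_cast
              omega

lemma spacedRev_reverse (bs : List Char) :
    ∀ (c : Nat) (M : Int), c ≤ 3 → (bs.length : Int) ≤ M → M % 4 = ((bs.length : Int) + c) % 4 →
      (spacedRev bs c).reverse = goD bs.reverse M := by
  induction bs with
  | nil => intro c M _ _ _; simp [spacedRev, goD]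
  | cons b t ih =>
      intro c M hc hlen hmod
      simp only [List.length_cons] at hlen hmod
      have hrev : (b :: t).reverse = t.reverse ++ [b] := by simp
      rw [hrev, goD_append]
      have hlt : (t.length : Int) ≤ M := by push_cast at hlen ⊢; omega
      by_cases h3 : c = 3
      · subst h3
        have h0 : (spacedRev t 0).reverse = goD t.reverse M := by
          apply ih 0 M (by omega) hlt
          push_cast at hmod ⊢; omega
        have hsp : (M - ((t.reverse.length : Nat) : Int)) % 4 = 0 := by
          simp only [List.length_reverse]
          push_cast at hmod ⊢; omega
        have hd : (4 : Int) ∣ (M - ((t.length : Nat) : Int)) := by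
          simp only [List.length_reverse] at hsp; omega
        simp [spacedRev, goD, h0, hsp, hd]
      · have hcc : c + 1 ≤ 3 := by omega
        have h0 : (spacedRev t (c + 1)).reverse = goD t.reverse M := by
          apply ih (c + 1) M hcc hlt
          push_cast at hmod ⊢; omega
        have hsp : ¬ (M - ((t.reverse.length : Nat) : Int)) % 4 = 0 := by
          simp only [List.length_reverse]
          push_cast at hmod ⊢; omega
        have hnd : ¬ (4 : Int) ∣ (M - ((t.length : Nat) : Int)) := by
          simp only [List.length_reverse] at hsp; omega
        simp [spacedRev, goD, h3, h0, hsp, hnd]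

lemma toChars_bit (n : Nat) (hn : n ≠ 0) :
    PySem.Int.toChars (PySem.Int.mod (n : Int) 2) = [if n % 2 = 1 then '1' else '0'] := by
  have h : PySem.Int.mod (n : Int) 2 = ((n % 2 : Nat) : Int) := by
    simp only [PySem.Int.mod]
    rw [Int.fmod_eq_emod, if_pos (Or.inl (by norm_num))]
    push_cast; omega
  rw [h]
  rcases Nat.mod_two_eq_zero_or_one n with h2 | h2 <;> simp [h2] <;> decide

lemma floordiv_two (n : Nat) :
    PySem.Int.floordiv (n : Int) 2 = ((n / 2 : Nat) : Int) := by
  simp only [PySem.Int.floordiv]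
  rw [Int.fdiv_eq_ediv, if_pos (Or.inl (by norm_num))]
  push_cast
  omega

lemma bnLoop_eq (n : Nat) : ∀ (c : Nat), c ≤ 3 → ∀ out,
    bnLoop (n : Int) (c : Int) out = (spacedRev (bnBitsRev n) c).reverse ++ out := by
  induction n using Nat.strong_induction_on with
  | _ n ih =>
    intro c hc out
    by_cases h0 : n = 0
    · subst h0
      rw [bnLoop, bnBitsRev]
      simp [spacedRev]
    · rw [bnLoop, bnBitsRev]
      have hpos : (0 : Int) < (n : Int) := by omega
      simp only [hpos, dif_pos, h0, dif_neg, not_false_iff]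
      rw [toChars_bit n h0, floordiv_two]
      simp only [List.singleton_append]
      have hdiv : n / 2 < n := Nat.div_lt_self (by omega) (by omega)
      by_cases h3 : c = 3
      · subst h3
        have hbeq : (((3 : Nat) : Int) + 1 == 4) = true := by decide
        simp only [hbeq, if_true]
        have := ih (n / 2) hdiv 0 (by omega)
          (' ' :: (if n % 2 = 1 then '1' else '0') :: out)
        simp only [Nat.cast_zero] at this
        rw [this]
        simp [spacedRev]
      · have hbeq : (((c : Nat) : Int) + 1 == 4) = false := by
          simp [beq_iff_eq]; omega
        simp only [hbeq, Bool.false_eq_true, if_false]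
        have hstep := ih (n / 2) hdiv (c + 1) (by omega)
          ((if n % 2 = 1 then '1' else '0') :: out)
        have hc1 : (((c + 1 : Nat)) : Int) = ((c : Nat) : Int) + 1 := by push_cast; ring
        rw [hc1] at hstep
        rw [hstep]
        simp [spacedRev, h3]

lemma enum_fold (l : List Char) : ∀ (L s : Int) (acc : List Char),
    (PySem.List.enumerate l s).foldl
      (fun acc ic => (if PySem.Int.mod (L - ic.1) 4 == 0 then acc ++ [' '] else acc) ++ [ic.2]) acc
    = acc ++ goD l (L - s) := by
  induction l with
  | nil => intro L s acc; simp [PySem.List.enumerate_nil, goD]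
  | cons x t ih =>
      intro L s acc
      rw [PySem.List.enumerate_cons]
      simp only [List.foldl_cons]
      rw [ih L (s + 1)]
      have hm : PySem.Int.mod (L - s) 4 = (L - s) % 4 := by
        simp only [PySem.Int.mod]
        rw [Int.fmod_eq_emod, if_pos (Or.inl (by norm_num))]
        ring_nf
      have harg : L - (s + 1) = (L - s) - 1 := by ring
      rw [harg]
      by_cases h : (L - s) % 4 = 0
      · simp [goD, hm, h, beq_iff_eq]
      · simp [goD, hm, h, beq_iff_eq]

-- ===== VERDICT (by name: the statement is the Claim_ definition above) =====
theorem binary_number_spec : Claim_equal_binary_number := by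
  unfold Claim_equal_binary_number Spec_binary_number
  intro in_num _
  unfold binary_number binary_number_alt
  by_cases h : in_num ≤ 0
  · rw [bnLoop]
    simp only [h, if_pos]
    have hneg : ¬ (0 : Int) < in_num := by omega
    simp [hneg]
    rfl
  · simp only [h, if_neg, not_false_iff]
    have hn : ((in_num.toNat : Nat) : Int) = in_num := by omega
    have hA : bnLoop in_num 0 [] =
        (spacedRev (bnBitsRev in_num.toNat) 0).reverse := by
      have := bnLoop_eq in_num.toNat 0 (by omega) []
      simp only [Nat.cast_zero, hn, List.append_nil] at this
      exact this
    rw [hA, enum_fold]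
    simp only [List.nil_append, sub_zero]
    congr 1
    apply spacedRev_reverse _ 0 _ (by omega)
    · simp [PySem.List.len]
    · simp [PySem.List.len]
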